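-- pv_equiv track=rewrite | github.com/xsmilebook/data_driven_EF | metric_compute/behavioral_metric_exploration.py | pick_acc_metric
-- ===== SOURCE A (Python) =====
-- ACC_PRIORITY_SUFFIXES = [
--     "_ACC",
--     "_Overall_ACC",
--     "_NoGo_ACC",
--     "_Go_ACC",
--     "_Stop_ACC",
--     "_Switch_ACC",
--     "_Repeat_ACC",
--     "_Switch_Cost_ACC",
--     "_Contrast_ACC",
--     "_Congruent_ACC",
--     "_Incongruent_ACC",
-- ]
--
-- def pick_acc_metric(task_prefix, acc_cols):
--     """Pick the primary ACC metric for a task."""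
--     candidates = [c for c in acc_cols if c.startswith(task_prefix + "_")]
--     if not candidates:
--         return "", []
--
--     for suffix in ACC_PRIORITY_SUFFIXES:
--         target = task_prefix + suffix
--         if target in candidates:
--             return target, candidates
--     return candidates[0], candidates
-- ===== SOURCE B (Python) =====
-- ACC_PRIORITY_SUFFIXES = [
--     "_ACC",
--     "_Overall_ACC",
--     "_NoGo_ACC",
--     "_Go_ACC",
--     "_Stop_ACC",
--     "_Switch_ACC",
--     "_Repeat_ACC",
--     "_Switch_Cost_ACC",
--     "_Contrast_ACC",
--     "_Congruent_ACC",
--     "_Incongruent_ACC",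
-- ]
--
-- _ACC_RANK = {s: i for i, s in enumerate(ACC_PRIORITY_SUFFIXES)}
--
--
-- def pick_acc_metric(task_prefix, acc_cols):
--     """Pick the primary ACC metric for a task (single pass, rank lookup)."""
--     candidates = [c for c in acc_cols if c.startswith(task_prefix + "_")]
--     if not candidates:
--         return "", []
--     n = len(task_prefix)
--     sentinel = len(ACC_PRIORITY_SUFFIXES)
--     best, best_rank = candidates[0], sentinel
--     for c in candidates:
--         r = _ACC_RANK.get(c[n:], sentinel)
--         if r < best_rank:
--             best, best_rank = c, r
--     return best, candidates
-- ===== Notes on version B (the rewrite author's own statement) =====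
-- stated objective: alternative
-- what changed: A scans the 11 priority suffixes and tests each target's membership in the candidate list; B builds a suffix-to-rank dictionary once and makes a single pass over the candidates, keeping the first candidate of minimal rank (sentinel rank when the suffix is unknown).
import Mathlib
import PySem

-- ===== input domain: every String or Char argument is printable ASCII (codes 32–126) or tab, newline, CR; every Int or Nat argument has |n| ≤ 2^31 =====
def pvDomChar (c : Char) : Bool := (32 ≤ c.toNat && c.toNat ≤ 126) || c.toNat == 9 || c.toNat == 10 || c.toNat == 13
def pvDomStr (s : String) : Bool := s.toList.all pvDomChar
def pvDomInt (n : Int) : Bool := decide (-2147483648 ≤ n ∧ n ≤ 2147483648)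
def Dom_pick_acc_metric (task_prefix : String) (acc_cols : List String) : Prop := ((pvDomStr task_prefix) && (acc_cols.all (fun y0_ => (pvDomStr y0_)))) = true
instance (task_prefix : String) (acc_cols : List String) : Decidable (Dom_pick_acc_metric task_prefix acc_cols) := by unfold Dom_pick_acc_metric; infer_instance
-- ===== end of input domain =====

-- B replaces A's scan over the 11 priority suffixes (one candidate-list membership test per
-- suffix) by a single pass over the candidates that looks each candidate's suffix up in a
-- suffix→rank dictionary and keeps the first candidate of minimal rank (objective: alternative).

-- ===== PORT A =====
def ACC_PRIORITY_SUFFIXES : List String :=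
  ["_ACC", "_Overall_ACC", "_NoGo_ACC", "_Go_ACC", "_Stop_ACC", "_Switch_ACC",
   "_Repeat_ACC", "_Switch_Cost_ACC", "_Contrast_ACC", "_Congruent_ACC", "_Incongruent_ACC"]

/-- A's `for suffix in ACC_PRIORITY_SUFFIXES: …` loop with its early `return target`. -/
def pickLoopA (task_prefix : String) (candidates : List String) : List String → Option String
  | [] => none
  | suffix :: rest =>
      let target := task_prefix ++ suffix
      if target ∈ candidates then some target else pickLoopA task_prefix candidates rest

def pick_acc_metric (task_prefix : String) (acc_cols : List String) : String × List String :=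
  let candidates := acc_cols.filter (fun c => PySem.Str.startswith c (task_prefix ++ "_"))
  if candidates = [] then ("", [])
  else
    match pickLoopA task_prefix candidates ACC_PRIORITY_SUFFIXES with
    | some target => (target, candidates)
    | none => (candidates.headI, candidates)

-- ===== PORT B =====
/-- `_ACC_RANK = {s: i for i, s in enumerate(ACC_PRIORITY_SUFFIXES)}` -/
def accRank : PySem.Dict String Int :=
  (PySem.List.enumerate ACC_PRIORITY_SUFFIXES).foldl (fun d is => d.insert is.2 is.1) PySem.Dict.empty

def pick_acc_metric_alt (task_prefix : String) (acc_cols : List String) : String × List String :=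
  let candidates := acc_cols.filter (fun c => PySem.Str.startswith c (task_prefix ++ "_"))
  if candidates = [] then ("", [])
  else
    let n := PySem.Str.len task_prefix
    let sentinel : Int := (ACC_PRIORITY_SUFFIXES.length : Int)
    let st := candidates.foldl
      (fun (st : String × Int) c =>
        let r := accRank.getD (PySem.Str.slice c (some n) none) sentinel
        if r < st.2 then (c, r) else st)
      (candidates.headI, sentinel)
    (st.1, candidates)

-- ===== PRECONDITION & SPEC =====
def Spec_pick_acc_metric (task_prefix : String) (acc_cols : List String) (out : String × List String) : Prop := out = pick_acc_metric_alt task_prefix acc_cols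
instance (task_prefix : String) (acc_cols : List String) (out : String × List String) : Decidable (Spec_pick_acc_metric task_prefix acc_cols out) := by unfold Spec_pick_acc_metric; infer_instance

-- ===== CLAIM (what is proved, stated in full; the proofs are below) =====
def Claim_equal_pick_acc_metric : Prop := ∀ (task_prefix : String) (acc_cols : List String), Dom_pick_acc_metric task_prefix acc_cols → Spec_pick_acc_metric task_prefix acc_cols (pick_acc_metric task_prefix acc_cols)

-- ===== LEMMAS AND PROOFS =====

/-- The rank B looks up for a candidate `c` (with the sentinel written as `11`). -/
def gRank (p c : String) : Int :=
  accRank.getD (PySem.Str.slice c (some (PySem.Str.len p)) none) 11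

/-- B's loop body, with the rank abbreviated. -/
def stepB (p : String) (st : String × Int) (c : String) : String × Int :=
  if gRank p c < st.2 then (c, gRank p c) else st

set_option maxHeartbeats 1000000 in
lemma accRank_cases (s : String) :
    accRank.getD s 11 = 11 ∨
    ∃ i : Nat, ∃ h : i < 11, accRank.getD s 11 = (i : Int) ∧
      s = ACC_PRIORITY_SUFFIXES[i]'(h.trans_eq rfl) := by
  by_cases h0 : s = "_ACC"
  · subst h0; exact Or.inr ⟨0, by omega, by rfl, by rfl⟩
  by_cases h1 : s = "_Overall_ACC"
  · subst h1; exact Or.inr ⟨1, by omega, by rfl, by rfl⟩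
  by_cases h2 : s = "_NoGo_ACC"
  · subst h2; exact Or.inr ⟨2, by omega, by rfl, by rfl⟩
  by_cases h3 : s = "_Go_ACC"
  · subst h3; exact Or.inr ⟨3, by omega, by rfl, by rfl⟩
  by_cases h4 : s = "_Stop_ACC"
  · subst h4; exact Or.inr ⟨4, by omega, by rfl, by rfl⟩
  by_cases h5 : s = "_Switch_ACC"
  · subst h5; exact Or.inr ⟨5, by omega, by rfl, by rfl⟩
  by_cases h6 : s = "_Repeat_ACC"
  · subst h6; exact Or.inr ⟨6, by omega, by rfl, by rfl⟩
  by_cases h7 : s = "_Switch_Cost_ACC"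
  · subst h7; exact Or.inr ⟨7, by omega, by rfl, by rfl⟩
  by_cases h8 : s = "_Contrast_ACC"
  · subst h8; exact Or.inr ⟨8, by omega, by rfl, by rfl⟩
  by_cases h9 : s = "_Congruent_ACC"
  · subst h9; exact Or.inr ⟨9, by omega, by rfl, by rfl⟩
  by_cases h10 : s = "_Incongruent_ACC"
  · subst h10; exact Or.inr ⟨10, by omega, by rfl, by rfl⟩
  left
  rw [PySem.Dict.getD_eq_get?_getD]
  have hc : accRank = ⟨[("_ACC",0),("_Overall_ACC",1),("_NoGo_ACC",2),("_Go_ACC",3),("_Stop_ACC",4),("_Switch_ACC",5),("_Repeat_ACC",6),("_Switch_Cost_ACC",7),("_Contrast_ACC",8),("_Congruent_ACC",9),("_Incongruent_ACC",10)]⟩ := by rfl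
  rw [hc]
  rw [PySem.Dict.get?_mk_cons, if_neg (fun he => h0 (beq_iff_eq.mp he).symm)]
  rw [PySem.Dict.get?_mk_cons, if_neg (fun he => h1 (beq_iff_eq.mp he).symm)]
  rw [PySem.Dict.get?_mk_cons, if_neg (fun he => h2 (beq_iff_eq.mp he).symm)]
  rw [PySem.Dict.get?_mk_cons, if_neg (fun he => h3 (beq_iff_eq.mp he).symm)]
  rw [PySem.Dict.get?_mk_cons, if_neg (fun he => h4 (beq_iff_eq.mp he).symm)]
  rw [PySem.Dict.get?_mk_cons, if_neg (fun he => h5 (beq_iff_eq.mp he).symm)]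
  rw [PySem.Dict.get?_mk_cons, if_neg (fun he => h6 (beq_iff_eq.mp he).symm)]
  rw [PySem.Dict.get?_mk_cons, if_neg (fun he => h7 (beq_iff_eq.mp he).symm)]
  rw [PySem.Dict.get?_mk_cons, if_neg (fun he => h8 (beq_iff_eq.mp he).symm)]
  rw [PySem.Dict.get?_mk_cons, if_neg (fun he => h9 (beq_iff_eq.mp he).symm)]
  rw [PySem.Dict.get?_mk_cons, if_neg (fun he => h10 (beq_iff_eq.mp he).symm)]
  rfl

lemma startswith_reconstruct (p c : String)
    (h : PySem.Str.startswith c (p ++ "_") = true) :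
    p ++ PySem.Str.slice c (some (PySem.Str.len p)) none = c := by
  rw [← String.toList_inj]
  have h' : (p ++ "_").toList <+: c.toList := by
    rw [PySem.Str.startswith_eq] at h
    exact (PySem.Chars.startswith_iff _ _).mp h
  obtain ⟨t, ht⟩ := h'
  have hclist : c.toList = p.toList ++ ('_' :: t) := by
    simpa using ht.symm
  have hslice : (PySem.Str.slice c (some (PySem.Str.len p)) none).toList
      = c.toList.drop p.toList.length := by
    rw [PySem.Str.toList_slice, PySem.Chars.slice_eq_listSlice, PySem.Str.len_eq]
    exact PySem.List.slice_from _ (by positivity)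
  have happ : (p ++ PySem.Str.slice c (some (PySem.Str.len p)) none).toList
      = p.toList ++ (PySem.Str.slice c (some (PySem.Str.len p)) none).toList := by simp
  rw [happ, hslice, hclist]
  simp

lemma slice_append (p s : String) :
    PySem.Str.slice (p ++ s) (some (PySem.Str.len p)) none = s := by
  rw [← String.toList_inj]
  rw [PySem.Str.toList_slice, PySem.Chars.slice_eq_listSlice, PySem.Str.len_eq]
  rw [PySem.List.slice_from _ (by positivity)]
  have happ : (p ++ s).toList = p.toList ++ s.toList := by simp
  rw [happ]
  simp

set_option maxHeartbeats 1000000 in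
lemma gRank_target (p : String) (j : Nat) (hj : j < ACC_PRIORITY_SUFFIXES.length) :
    gRank p (p ++ ACC_PRIORITY_SUFFIXES[j]) = (j : Int) := by
  unfold gRank
  rw [slice_append]
  have hj' : j < 11 := hj.trans_eq rfl
  interval_cases j <;> rfl

lemma gRank_cases (p c : String) (h : PySem.Str.startswith c (p ++ "_") = true) :
    gRank p c = 11 ∨
    ∃ i : Nat, ∃ h : i < 11, gRank p c = (i : Int) ∧
      c = p ++ ACC_PRIORITY_SUFFIXES[i]'(h.trans_eq rfl) := by
  rcases accRank_cases (PySem.Str.slice c (some (PySem.Str.len p)) none) with h11 | ⟨i, hi, hv, hs⟩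
  · exact Or.inl h11
  · exact Or.inr ⟨i, hi, hv, by rw [← startswith_reconstruct p c h, hs]⟩

lemma gRank_bounds (p c : String) : 0 ≤ gRank p c ∧ gRank p c ≤ 11 := by
  rcases accRank_cases (PySem.Str.slice c (some (PySem.Str.len p)) none) with h11 | ⟨i, hi, hv, _⟩
  · unfold gRank; omega
  · unfold gRank; rw [hv]; omega

lemma pickLoopA_none (p : String) (cands : List String) :
    ∀ l : List String, (∀ s ∈ l, (p ++ s) ∉ cands) → pickLoopA p cands l = none := by
  intro l
  induction l with
  | nil => intro _; rfl
  | cons s rest ih =>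
      intro h
      simp only [pickLoopA]
      rw [if_neg (h s (List.mem_cons_self))]
      exact ih fun t ht => h t (List.mem_cons_of_mem _ ht)

lemma pickLoopA_found (p : String) (cands : List String) :
    ∀ (l : List String) (i : Nat) (h : i < l.length),
      (p ++ l[i]) ∈ cands → (∀ j (hj : j < i), (p ++ l[j]'(Nat.lt_trans hj h)) ∉ cands) →
      pickLoopA p cands l = some (p ++ l[i]) := by
  intro l
  induction l with
  | nil => intro i h; exact absurd h (by simp)
  | cons s rest ih =>
      intro i h hmem hmin
      cases i with
      | zero =>
          simp only [pickLoopA]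
          rw [if_pos (by simpa using hmem)]
          simp
      | succ i =>
          simp only [pickLoopA]
          rw [if_neg (by simpa using hmin 0 (Nat.succ_pos i))]
          have := ih i (by simpa using h) (by simpa using hmem)
            (fun j hj => by simpa using hmin (j + 1) (by omega))
          simpa using this

lemma fold_inv (p : String) (cands : List String)
    (hSW : ∀ c ∈ cands, PySem.Str.startswith c (p ++ "_") = true) :
    ∀ (l : List String), (∀ c ∈ l, c ∈ cands) → ∀ (b : String) (v : Int),
      0 ≤ v → v ≤ 11 →
      (v < 11 → ∃ i : Nat, ∃ h : i < 11, v = (i : Int) ∧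
          b = p ++ ACC_PRIORITY_SUFFIXES[i]'(h.trans_eq rfl) ∧ b ∈ cands) →
      (0 ≤ (l.foldl (stepB p) (b, v)).2 ∧ (l.foldl (stepB p) (b, v)).2 ≤ v) ∧
      ((l.foldl (stepB p) (b, v)).2 < 11 → ∃ i : Nat, ∃ h : i < 11,
          (l.foldl (stepB p) (b, v)).2 = (i : Int) ∧
          (l.foldl (stepB p) (b, v)).1 = p ++ ACC_PRIORITY_SUFFIXES[i]'(h.trans_eq rfl) ∧
          (l.foldl (stepB p) (b, v)).1 ∈ cands) ∧
      (∀ c ∈ l, (l.foldl (stepB p) (b, v)).2 ≤ gRank p c) ∧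
      ((l.foldl (stepB p) (b, v)).2 = v → (l.foldl (stepB p) (b, v)).1 = b) := by
  intro l
  induction l with
  | nil =>
      intro _ b v h0 _ hb
      exact ⟨⟨h0, le_refl _⟩, fun hlt => hb hlt,
        fun c hc => absurd hc (List.not_mem_nil), fun _ => rfl⟩
  | cons c l ih =>
      intro hsub b v h0 h11 hb
      have hcmem : c ∈ cands := hsub c List.mem_cons_self
      have hsub' : ∀ x ∈ l, x ∈ cands := fun x hx => hsub x (List.mem_cons_of_mem _ hx)
      simp only [List.foldl_cons]
      by_cases hlt : gRank p c < v
      · have hg := gRank_bounds p c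
        have hstep : stepB p (b, v) c = (c, gRank p c) := by simp [stepB, hlt]
        rw [hstep]
        have hbp : gRank p c < 11 → ∃ i : Nat, ∃ h : i < 11, gRank p c = (i : Int) ∧
            c = p ++ ACC_PRIORITY_SUFFIXES[i]'(h.trans_eq rfl) ∧ c ∈ cands := by
          intro _
          rcases gRank_cases p c (hSW c hcmem) with h11' | ⟨i, hi, hv, hc⟩
          · omega
          · exact ⟨i, hi, hv, hc, hcmem⟩
        have H := ih hsub' c (gRank p c) hg.1 hg.2 hbp
        refine ⟨⟨H.1.1, le_trans H.1.2 (le_of_lt hlt)⟩, H.2.1, ?_, ?_⟩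
        · intro x hx
          rcases List.mem_cons.mp hx with rfl | hx'
          · exact H.1.2
          · exact H.2.2.1 x hx'
        · intro hr
          exfalso
          have := H.1.2
          omega
      · have hstep : stepB p (b, v) c = (b, v) := by simp [stepB, hlt]
        rw [hstep]
        have H := ih hsub' b v h0 h11 hb
        refine ⟨H.1, H.2.1, ?_, H.2.2.2⟩
        intro x hx
        rcases List.mem_cons.mp hx with rfl | hx'
        · have := H.1.2; omega
        · exact H.2.2.1 x hx'

theorem pick_acc_metric_eq (p : String) (cols : List String) :
    pick_acc_metric p cols = pick_acc_metric_alt p cols := by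
  classical
  set cands := cols.filter (fun c => PySem.Str.startswith c (p ++ "_")) with hcands
  have hA : pick_acc_metric p cols =
      (if cands = [] then ("", [])
       else match pickLoopA p cands ACC_PRIORITY_SUFFIXES with
            | some target => (target, cands)
            | none => (cands.headI, cands)) := rfl
  have hB : pick_acc_metric_alt p cols =
      (if cands = [] then ("", ([] : List String))
       else ((cands.foldl (stepB p) (cands.headI, (11 : Int))).1, cands)) := rfl
  rw [hA, hB]
  by_cases hE : cands = []
  · rw [if_pos hE, if_pos hE]
  · rw [if_neg hE, if_neg hE]
    have hSW : ∀ c ∈ cands, PySem.Str.startswith c (p ++ "_") = true := by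
      intro c hc
      rw [hcands] at hc
      exact (List.mem_filter.mp hc).2
    obtain ⟨⟨hr0, hrle⟩, hltE, hmin, hfix⟩ :=
      fold_inv p cands hSW cands (fun x hx => hx) cands.headI 11
        (by norm_num) (le_refl _) (fun h => absurd h (by norm_num))
    by_cases hcase : (cands.foldl (stepB p) (cands.headI, (11 : Int))).2 < 11
    · obtain ⟨i, hi, hv, hbst, hmem⟩ := hltE hcase
      have hfound := pickLoopA_found p cands ACC_PRIORITY_SUFFIXES i (hi.trans_eq rfl)
        (by rw [hbst] at hmem; exact hmem)
        (by
          intro j hj hmemj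
          have hle := hmin _ hmemj
          rw [gRank_target p j (Nat.lt_trans hj (hi.trans_eq rfl))] at hle
          omega)
      rw [hfound]
      simp only [hbst]
      rfl
    · have h11 : (cands.foldl (stepB p) (cands.headI, (11 : Int))).2 = 11 := by omega
      have hnone := pickLoopA_none p cands ACC_PRIORITY_SUFFIXES (by
        intro s hs hmem
        obtain ⟨j, hj, hsj⟩ := List.mem_iff_getElem.mp hs
        subst hsj
        have hle := hmin _ hmem
        rw [gRank_target p j hj] at hle
        have hjlt : j < 11 := hj.trans_eq rfl
        omega)
      rw [hnone]
      simp [hfix h11]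

-- ===== VERDICT (by name: the statement is the Claim_ definition above) =====
theorem pick_acc_metric_spec : Claim_equal_pick_acc_metric := by
  intro p cols _
  unfold Spec_pick_acc_metric
  exact pick_acc_metric_eq p cols
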